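-- pv_equiv track=rewrite | github.com/Patxi91/CodeWars_Cloud | 6kyu-Calculate String Rotation-Patxi.py | shifted_diff
-- ===== SOURCE A (Python) =====
-- def shifted_diff(first, second):
--     if len(first) != len(second):
--         return -1
--
--     if first == second:
--         return 0
--
--     for i in range(len(first)):
--         rotated = first[i:] + first[:i]
--         if rotated == second:
--             return len(first) - i
--
--     return -1
-- ===== SOURCE B (Python) =====
-- def shifted_diff(first, second):
--     if len(first) != len(second):
--         return -1
--     i = (first + first).find(second)
--     if i < 0:
--         return -1
--     return 0 if i == 0 else len(first) - i
-- ===== Notes on version B (the rewrite author's own statement) =====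
-- stated objective: faster
-- what changed: Replaces the loop that builds and compares every rotation with a single substring search of second inside first+first (C-level str.find), returning len(first) - index of the first occurrence.
import Mathlib
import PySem

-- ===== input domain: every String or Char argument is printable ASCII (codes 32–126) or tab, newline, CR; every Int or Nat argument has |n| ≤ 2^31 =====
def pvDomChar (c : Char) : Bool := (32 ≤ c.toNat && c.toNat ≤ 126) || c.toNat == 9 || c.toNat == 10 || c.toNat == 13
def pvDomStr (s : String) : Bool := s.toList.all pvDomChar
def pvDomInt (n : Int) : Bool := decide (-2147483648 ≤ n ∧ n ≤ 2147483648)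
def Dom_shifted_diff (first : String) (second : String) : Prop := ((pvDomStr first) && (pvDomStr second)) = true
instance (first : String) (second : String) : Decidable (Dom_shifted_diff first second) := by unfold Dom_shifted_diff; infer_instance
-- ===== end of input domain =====

-- B replaces A's quadratic rotate-and-compare loop with one substring search in first+first (asymptotically faster).

-- ===== PORT A =====
-- the 'for i in range(len(first))' loop with its early return
def pvLoopA (f s : List Char) (n : Nat) : List Int → Int
  | [] => -1
  | i :: rest =>
      if PySem.Chars.slice f (some i) none ++ PySem.Chars.slice f none (some i) = s then
        (n : Int) - i
      else pvLoopA f s n rest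

def shifted_diff (first : String) (second : String) : Int :=
  let f := first.toList
  let s := second.toList
  if f.length ≠ s.length then -1
  else if f = s then 0
  else pvLoopA f s f.length (PySem.List.pyRange 0 (f.length : Int) 1)

-- ===== PORT B =====
def shifted_diff_alt (first : String) (second : String) : Int :=
  let f := first.toList
  let s := second.toList
  if f.length ≠ s.length then -1
  else
    let i := PySem.Chars.find (f ++ f) s
    if i < 0 then -1
    else if i = 0 then 0 else (f.length : Int) - i

-- ===== PRECONDITION & SPEC =====
def Spec_shifted_diff (first : String) (second : String) (out : Int) : Prop := out = shifted_diff_alt first second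
instance (first : String) (second : String) (out : Int) : Decidable (Spec_shifted_diff first second out) := by unfold Spec_shifted_diff; infer_instance

-- ===== CLAIM (what is proved, stated in full; the proofs are below) =====
def Claim_equal_shifted_diff : Prop := ∀ (first : String) (second : String), Dom_shifted_diff first second → Spec_shifted_diff first second (shifted_diff first second)

-- ===== LEMMAS AND PROOFS =====

-- left rotation by i, the value A's loop builds at step i
def pvRot (f : List Char) (i : Nat) : List Char := f.drop i ++ f.take i

lemma pvLoopA_cond (f s : List Char) (n : Nat) (i : Nat) (rest : List Int) :
    pvLoopA f s n ((i : Int) :: rest) =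
      if pvRot f i = s then (n : Int) - (i : Int) else pvLoopA f s n rest := by
  simp [pvLoopA, pvRot, PySem.List.slice_from_natCast, PySem.List.slice_to_natCast]

-- a prefix of f++f at position i ≤ |f| is exactly "rotation by i equals s" (when lengths agree)
lemma pvPrefix_iff_rot (f s : List Char) (hlen : s.length = f.length) (i : Nat)
    (hi : i ≤ f.length) : s <+: (f ++ f).drop i ↔ pvRot f i = s := by
  rw [List.drop_append_of_le_length hi, List.prefix_iff_eq_take, hlen]
  rw [List.take_append, List.take_of_length_le (by simp), List.length_drop]
  have h2 : f.length - (f.length - i) = i := by omega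
  rw [h2, pvRot, eq_comm]

lemma pvLoopA_none (f s : List Char) (h : ∀ i < f.length, pvRot f i ≠ s) :
    ∀ k : Nat, pvLoopA f s f.length (PySem.List.pyRange (k : Int) (f.length : Int) 1) = -1 := by
  intro k
  induction hfuel : f.length - k generalizing k with
  | zero =>
      rw [PySem.List.pyRange_one]
      have hz : ((f.length : Int) - (k : Int)).toNat = 0 := by omega
      simp [hz, pvLoopA]
  | succ m ih =>
      have hk : (k : Int) < (f.length : Int) := by omega
      rw [PySem.List.pyRange_one_cons hk, pvLoopA_cond, if_neg (h k (by omega))]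
      have hc : (k : Int) + 1 = ((k + 1 : Nat) : Int) := by push_cast; ring
      rw [hc, ih (k + 1) (by omega)]

lemma pvLoopA_some (f s : List Char) (j : Nat) (hj : j < f.length)
    (hP : pvRot f j = s) (hmin : ∀ i < j, pvRot f i ≠ s) :
    ∀ k : Nat, k ≤ j →
      pvLoopA f s f.length (PySem.List.pyRange (k : Int) (f.length : Int) 1)
        = (f.length : Int) - (j : Int) := by
  intro k hkj
  induction hfuel : j - k generalizing k with
  | zero =>
      have hk : k = j := by omega
      subst hk
      rw [PySem.List.pyRange_one_cons (by omega), pvLoopA_cond, if_pos hP]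
  | succ m ih =>
      rw [PySem.List.pyRange_one_cons (by omega), pvLoopA_cond, if_neg (hmin k (by omega))]
      have hc : (k : Int) + 1 = ((k + 1 : Nat) : Int) := by push_cast; ring
      rw [hc, ih (k + 1) (by omega) (by omega)]

-- the whole equivalence, stated on the underlying character lists
lemma pvKey (f s : List Char) (hlen : f.length = s.length) :
    (if f = s then (0 : Int)
     else pvLoopA f s f.length (PySem.List.pyRange 0 (f.length : Int) 1)) =
    (if PySem.Chars.find (f ++ f) s < 0 then -1
     else if PySem.Chars.find (f ++ f) s = 0 then 0
     else (f.length : Int) - PySem.Chars.find (f ++ f) s) := by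
  by_cases heq : f = s
  · subst heq
    have hinf : f <:+: f ++ f := (List.prefix_append f f).isInfix
    have hnn : 0 ≤ PySem.Chars.find (f ++ f) f :=
      (PySem.Chars.find_nonneg_iff _ _).mpr hinf
    have hspec := PySem.Chars.find_spec (s := f ++ f) (sub := f) hnn
    have hz : PySem.Chars.find (f ++ f) f = 0 := by
      by_contra hne
      have hpos : 0 < (PySem.Chars.find (f ++ f) f).toNat := by omega
      exact hspec.2 0 hpos (by simp)
    simp [hz]
  · rw [if_neg heq]
    by_cases hneg : PySem.Chars.find (f ++ f) s < 0
    · -- no occurrence of second in first+first: A's loop finds no rotation either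
      have hj1 : PySem.Chars.find (f ++ f) s = -1 := by
        have := PySem.Chars.neg_one_le_find (s := f ++ f) (sub := s)
        omega
      have hninf : ¬ s <:+: f ++ f := (PySem.Chars.find_eq_neg_one_iff _ _).mp hj1
      have hnone : ∀ i < f.length, pvRot f i ≠ s := by
        intro i hi hrot
        exact hninf <| (PySem.Chars.isIn_iff_infix _ _).mp <|
          (PySem.Chars.exists_prefix_drop_iff_isIn _ _).mp
            ⟨i, (pvPrefix_iff_rot f s hlen.symm i (le_of_lt hi)).mpr hrot⟩
      rw [if_pos hneg]
      exact_mod_cast pvLoopA_none f s hnone 0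
    · replace hneg : 0 ≤ PySem.Chars.find (f ++ f) s := Int.not_lt.mp hneg
      obtain ⟨jn, hjcast⟩ : ∃ m : Nat, (m : Int) = PySem.Chars.find (f ++ f) s :=
        ⟨_, Int.toNat_of_nonneg hneg⟩
      have hspec := PySem.Chars.find_spec (s := f ++ f) (sub := s) hneg
      have htn : (PySem.Chars.find (f ++ f) s).toNat = jn := by omega
      rw [htn] at hspec
      have hpre : s <+: (f ++ f).drop jn := hspec.1
      have hjle : jn ≤ f.length := by
        have h1 := hpre.length_le
        have h2 := PySem.Chars.find_le_length (s := f ++ f) (sub := s)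
        rw [List.length_drop, List.length_append] at h1
        rw [List.length_append] at h2
        omega
      have hrot : pvRot f jn = s := (pvPrefix_iff_rot f s hlen.symm jn hjle).mp hpre
      have hjne : jn ≠ f.length := by
        intro h
        exact heq (by rw [h] at hrot; simpa [pvRot] using hrot)
      have hj0 : jn ≠ 0 := by
        intro h
        exact heq (by rw [h] at hrot; simpa [pvRot] using hrot)
      have hmin : ∀ i < jn, pvRot f i ≠ s := by
        intro i hij hrot'
        exact hspec.2 i hij ((pvPrefix_iff_rot f s hlen.symm i (by omega)).mpr hrot')
      have hA := pvLoopA_some f s jn (by omega) hrot hmin 0 (by omega)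
      rw [if_neg (by omega), if_neg (by omega), ← hjcast]
      exact_mod_cast hA

-- ===== VERDICT (by name: the statement is the Claim_ definition above) =====
-- pvKey with the equal-length guard both ports share
lemma pvKeyFull (f s : List Char) :
    (if f.length ≠ s.length then (-1 : Int)
     else if f = s then 0
     else pvLoopA f s f.length (PySem.List.pyRange 0 (f.length : Int) 1)) =
    (if f.length ≠ s.length then -1
     else if PySem.Chars.find (f ++ f) s < 0 then -1
     else if PySem.Chars.find (f ++ f) s = 0 then 0
     else (f.length : Int) - PySem.Chars.find (f ++ f) s) := by
  by_cases hlen : f.length = s.length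
  · have hc : ¬ (f.length ≠ s.length) := by simp [hlen]
    simp only [if_neg hc]
    exact pvKey f s hlen
  · simp only [if_pos hlen]

theorem shifted_diff_spec : Claim_equal_shifted_diff := by
  intro first second _
  show shifted_diff first second = shifted_diff_alt first second
  exact pvKeyFull first.toList second.toList
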